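-- pv_equiv track=rewrite | github.com/cherry0722/Style-with-Ai | backend/ai/preference.py | update_profile_counts
-- ===== SOURCE A (Python) =====
-- from typing import List, Dict, Any, Optional
--
-- def _safe_lower(x: Optional[str]) -> str:
--     return (x or "").lower()
--
-- def update_profile_counts(up: Dict[str, Any], items: List[Dict[str, Any]], label: str) -> Dict[str, Any]:
--     mul = 1 if label == "like" else -1
--     col = up.setdefault("preferred_colors", {})
--     fab = up.setdefault("preferred_fabrics", {})
--     form = up.setdefault("preferred_formality", {})
--
--     for it in items:
--         c = _safe_lower(it.get("color"))
--         f = _safe_lower(it.get("fabric"))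
--         fm = _safe_lower(it.get("formality"))
--         if c:
--             col[c] = col.get(c, 0) + mul
--         if f:
--             fab[f] = fab.get(f, 0) + mul
--         if fm:
--             form[fm] = form.get(fm, 0) + mul
--
--     return up
-- ===== SOURCE B (Python) =====
-- from typing import List, Dict, Any, Optional
--
-- def _safe_lower(x: Optional[str]) -> str:
--     return (x or "").lower()
--
-- def _count(values):
--     c = {}
--     for v in values:
--         c[v] = c.get(v, 0) + 1
--     return c
--
-- def update_profile_counts(up: Dict[str, Any], items: List[Dict[str, Any]], label: str) -> Dict[str, Any]:
--     mul = 1 if label == "like" else -1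
--     for key, field in (("preferred_colors", "color"),
--                        ("preferred_fabrics", "fabric"),
--                        ("preferred_formality", "formality")):
--         target = up.setdefault(key, {})
--         counts = _count(v for it in items if (v := _safe_lower(it.get(field))))
--         for k, n in counts.items():
--             target[k] = target.get(k, 0) + mul * n
--     return up
-- ===== Notes on version B (the rewrite author's own statement) =====
-- stated objective: idiomatic
-- what changed: Replaces the single interleaved per-item pass updating three dicts at once by a loop over the three (profile-key, item-field) pairs that first aggregates each attribute's non-empty lowered values into a count dict in one pass and then merges that count dict into the profile dict with one scaled update per distinct value.
import Mathlib
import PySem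

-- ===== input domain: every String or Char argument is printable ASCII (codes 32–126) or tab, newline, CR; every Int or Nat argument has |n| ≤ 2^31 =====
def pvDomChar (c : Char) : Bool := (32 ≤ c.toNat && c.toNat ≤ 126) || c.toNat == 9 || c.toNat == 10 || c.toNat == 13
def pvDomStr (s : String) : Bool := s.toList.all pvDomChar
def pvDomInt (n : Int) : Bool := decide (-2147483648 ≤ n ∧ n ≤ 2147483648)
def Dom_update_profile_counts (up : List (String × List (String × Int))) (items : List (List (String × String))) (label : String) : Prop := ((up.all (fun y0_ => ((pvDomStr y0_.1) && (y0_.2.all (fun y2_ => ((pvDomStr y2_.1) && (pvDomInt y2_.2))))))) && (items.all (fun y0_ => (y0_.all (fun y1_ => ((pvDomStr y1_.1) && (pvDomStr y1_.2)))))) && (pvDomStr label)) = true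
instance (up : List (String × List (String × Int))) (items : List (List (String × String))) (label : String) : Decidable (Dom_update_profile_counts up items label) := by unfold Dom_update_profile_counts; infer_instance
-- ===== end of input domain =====

-- B replaces A's single interleaved per-item pass by, per attribute, one aggregation pass building a
-- count dict plus one merge into the profile dict (objective: idiomatic; same O(n) cost).
-- A mutates `up` in place (setdefault / nested-dict updates) and returns it; the theorem is about the
-- RETURN value (B performs the same mutations).

-- ===== PORT A =====
-- marshalling (shared by both ports): the Python arguments are dicts / lists of dicts
def pvOuter (up : List (String × List (String × Int))) : PySem.Dict String (PySem.Dict String Int) :=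
  up.foldl (fun d p => d.insert p.1 (PySem.Dict.ofList p.2)) PySem.Dict.empty

def pvItems (items : List (List (String × String))) : List (PySem.Dict String String) :=
  items.map PySem.Dict.ofList

def pvOut (d : PySem.Dict String (PySem.Dict String Int)) : List (String × List (String × Int)) :=
  d.items.map (fun p => (p.1, p.2.items))

-- _safe_lower(x) = (x or "").lower()
def safeLower (x : Option String) : String := PySem.Str.lower (x.getD "")

def update_profile_counts (up : List (String × List (String × Int))) (items : List (List (String × String))) (label : String) : List (String × List (String × Int)) :=
  let mul : Int := if label == "like" then 1 else -1
  let d := pvOuter up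
  let its := pvItems items
  -- col = up.setdefault("preferred_colors", {})  (value first, then the mutated dict), etc.
  let col := d.getD "preferred_colors" PySem.Dict.empty
  let d := d.setdefault "preferred_colors" PySem.Dict.empty
  let fab := d.getD "preferred_fabrics" PySem.Dict.empty
  let d := d.setdefault "preferred_fabrics" PySem.Dict.empty
  let form := d.getD "preferred_formality" PySem.Dict.empty
  let d := d.setdefault "preferred_formality" PySem.Dict.empty
  -- the single pass over items, updating the three count dicts
  let s := its.foldl (fun (s : PySem.Dict String Int × PySem.Dict String Int × PySem.Dict String Int) it =>
      let c := safeLower (it.get? "color")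
      let f := safeLower (it.get? "fabric")
      let fm := safeLower (it.get? "formality")
      let col := if c ≠ "" then s.1.insert c (s.1.getD c 0 + mul) else s.1
      let fab := if f ≠ "" then s.2.1.insert f (s.2.1.getD f 0 + mul) else s.2.1
      let form := if fm ≠ "" then s.2.2.insert fm (s.2.2.getD fm 0 + mul) else s.2.2
      (col, fab, form)) (col, fab, form)
  -- return up (the three dicts were mutated through the references col/fab/form)
  pvOut (((d.insert "preferred_colors" s.1).insert "preferred_fabrics" s.2.1).insert "preferred_formality" s.2.2)

-- ===== PORT B =====
-- _count(values): one aggregation pass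
def pvCount (values : List String) : PySem.Dict String Int :=
  values.foldl (fun c v => c.insert v (c.getD v 0 + 1)) PySem.Dict.empty

-- for k, n in counts.items(): target[k] = target.get(k, 0) + mul * n
def pvMerge (target : PySem.Dict String Int) (counts : List (String × Int)) (mul : Int) : PySem.Dict String Int :=
  counts.foldl (fun t p => t.insert p.1 (t.getD p.1 0 + mul * p.2)) target

-- [v for it in items if (v := _safe_lower(it.get(field)))]
def pvFieldVals (its : List (PySem.Dict String String)) (field : String) : List String :=
  (its.map (fun it => safeLower (it.get? field))).filter (fun v => v ≠ "")

def update_profile_counts_alt (up : List (String × List (String × Int))) (items : List (List (String × String))) (label : String) : List (String × List (String × Int)) :=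
  let mul : Int := if label == "like" then 1 else -1
  let its := pvItems items
  let d := [("preferred_colors", "color"), ("preferred_fabrics", "fabric"), ("preferred_formality", "formality")].foldl
    (fun d (kf : String × String) =>
      let target := d.getD kf.1 PySem.Dict.empty
      let d := d.setdefault kf.1 PySem.Dict.empty
      d.insert kf.1 (pvMerge target (pvCount (pvFieldVals its kf.2)).items mul)) (pvOuter up)
  pvOut d

-- ===== PRECONDITION & SPEC =====
def Spec_update_profile_counts (up : List (String × List (String × Int))) (items : List (List (String × String))) (label : String) (out : List (String × List (String × Int))) : Prop := out = update_profile_counts_alt up items label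
instance (up : List (String × List (String × Int))) (items : List (List (String × String))) (label : String) (out : List (String × List (String × Int))) : Decidable (Spec_update_profile_counts up items label out) := by unfold Spec_update_profile_counts; infer_instance

-- ===== CLAIM (what is proved, stated in full; the proofs are below) =====
def Claim_equal_update_profile_counts : Prop := ∀ (up : List (String × List (String × Int))) (items : List (List (String × String))) (label : String), Dom_update_profile_counts up items label → Spec_update_profile_counts up items label (update_profile_counts up items label)

-- ===== LEMMAS AND PROOFS =====

-- A's per-item conditional update, iterated: what A's loop does to ONE of the three dicts
def pvApply (t : PySem.Dict String Int) (xs : List String) (mul : Int) : PySem.Dict String Int :=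
  xs.foldl (fun t c => t.insert c (t.getD c 0 + mul)) t

-- inserting at a key ALREADY PRESENT commutes (structurally) with an insert at any other key
theorem insert_insert_of_contains {κ ν : Type} [BEq κ] [LawfulBEq κ]
    (d : PySem.Dict κ ν) (x k : κ) (u w : ν) (hx : d.contains x = true) (hne : k ≠ x) :
    (d.insert x u).insert k w = (d.insert k w).insert x u := by
  have hkx : (k == x) = false := by simp [hne]
  have hcx : (d.insert k w).contains x = true := by
    rw [PySem.Dict.contains_insert]; simp [hx]
  have hck : (d.insert x u).contains k = d.contains k := by
    rw [PySem.Dict.contains_insert]; simp [hkx]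
  apply PySem.Dict.ext
  by_cases hk : d.contains k = true
  · rw [PySem.Dict.items_insert_of_contains _ _ (hck.trans hk),
        PySem.Dict.items_insert_of_contains _ _ hx,
        PySem.Dict.items_insert_of_contains _ _ hcx,
        PySem.Dict.items_insert_of_contains _ _ hk]
    rw [List.map_map, List.map_map]
    apply List.map_congr_left
    intro p _
    simp only [Function.comp]
    have hxk : (x == k) = false := beq_eq_false_iff_ne.mpr (Ne.symm hne)
    by_cases hpx : (p.1 == x) = true
    · have hpk : (p.1 == k) = false := by
        rw [eq_of_beq hpx]; exact hxk
      simp [hpx, hpk, hxk]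
    · by_cases hpk : (p.1 == k) = true
      · simp [hpx, hpk, hkx]
      · simp [hpx, hpk]
  · have hk' : d.contains k = false := by simpa using hk
    rw [PySem.Dict.items_insert_of_not_contains _ _ (hck.trans hk'),
        PySem.Dict.items_insert_of_contains _ _ hx,
        PySem.Dict.items_insert_of_contains _ _ hcx,
        PySem.Dict.items_insert_of_not_contains _ _ hk']
    rw [List.map_append]
    simp [hkx]

-- merging a count list that does not mention x commutes with updating x's value (x already present)
theorem merge_insert_comm (d : PySem.Dict String Int) (L : List (String × Int)) (mul : Int)
    (x : String) (u : Int) (hx : d.contains x = true) (hL : ∀ p ∈ L, p.1 ≠ x) :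
    pvMerge (d.insert x u) L mul = (pvMerge d L mul).insert x u := by
  induction L generalizing d with
  | nil => rfl
  | cons p L ih =>
    have hp : p.1 ≠ x := hL p (by simp)
    simp only [pvMerge, List.foldl_cons]
    rw [PySem.Dict.getD_insert_of_ne _ _ _ hp,
        insert_insert_of_contains d x p.1 u _ hx hp]
    exact ih (d.insert p.1 _)
      (by rw [PySem.Dict.contains_insert]; simp [hx])
      (fun q hq => hL q (by simp [hq]))

theorem getD_merge_of_not_mem (d : PySem.Dict String Int) (L : List (String × Int)) (mul : Int)
    (x : String) (hL : ∀ p ∈ L, p.1 ≠ x) :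
    (pvMerge d L mul).getD x 0 = d.getD x 0 := by
  induction L generalizing d with
  | nil => rfl
  | cons p L ih =>
    have hp : p.1 ≠ x := hL p (by simp)
    simp only [pvMerge, List.foldl_cons]
    have h := ih (d.insert p.1 (d.getD p.1 0 + mul * p.2)) (fun q hq => hL q (by simp [hq]))
    simp only [pvMerge] at h
    rw [h, PySem.Dict.getD_insert_of_ne _ _ _ (Ne.symm hp)]

-- substituting v+1 for the unique (x, v) entry of a count list = one more insert on the merged dict
theorem merge_subst (t : PySem.Dict String Int) (L : List (String × Int)) (mul : Int)
    (x : String) (v : Int) (hnd : (L.map Prod.fst).Nodup) (hmem : (x, v) ∈ L) :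
    pvMerge t (L.map (fun p => if (p.1 == x) = true then (x, v + 1) else p)) mul
      = (pvMerge t L mul).insert x ((pvMerge t L mul).getD x 0 + mul) := by
  induction L generalizing t with
  | nil => cases hmem
  | cons p L ih =>
    simp only [List.map_cons, List.nodup_cons] at hnd
    by_cases hpx : (p.1 == x) = true
    · have hx1 : p.1 = x := eq_of_beq hpx
      have hxL : ∀ q ∈ L, q.1 ≠ x := by
        intro q hq h
        exact hnd.1 (hx1 ▸ h ▸ List.mem_map_of_mem hq)
      have hv : p = (x, v) := by
        rcases List.mem_cons.mp hmem with h | h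
        · exact h.symm
        · exact absurd rfl (hxL _ h)
      have hmapid : L.map (fun p => if (p.1 == x) = true then (x, v + 1) else p) = L := by
        exact (List.map_congr_left (fun q hq => by
          simp [beq_eq_false_iff_ne.mpr (hxL q hq)])).trans (List.map_id L)
      subst hv
      simp only [List.map_cons, hpx, if_true, hmapid, pvMerge, List.foldl_cons]
      have ha := getD_merge_of_not_mem (t.insert x (t.getD x 0 + mul * v)) L mul x hxL
      simp only [pvMerge] at ha
      rw [PySem.Dict.getD_insert_self] at ha
      have hcomm := merge_insert_comm (t.insert x (t.getD x 0 + mul * v)) L mul x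
        (t.getD x 0 + mul * v + mul) (PySem.Dict.contains_insert_self _ _ _) hxL
      simp only [pvMerge, PySem.Dict.insert_insert_self] at hcomm
      rw [ha, ← hcomm]
      have hval : t.getD x 0 + mul * (v + 1) = t.getD x 0 + mul * v + mul := by ring
      rw [hval]
    · have hmem' : (x, v) ∈ L := by
        rcases List.mem_cons.mp hmem with h | h
        · exact absurd (by rw [← h]; simp) hpx
        · exact h
      simp only [List.map_cons, hpx, pvMerge, List.foldl_cons]
      have := ih (t.insert p.1 (t.getD p.1 0 + mul * p.2)) hnd.2 hmem'
      simpa only [pvMerge] using this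

-- bumping one counter entry by 1 = one more conditional insert on the merged dict
theorem merge_bump (t acc : PySem.Dict String Int) (mul : Int) (x : String)
    (hnd : acc.keys.Nodup) :
    pvMerge t ((acc.insert x (acc.getD x 0 + 1)).items) mul
      = (pvMerge t acc.items mul).insert x ((pvMerge t acc.items mul).getD x 0 + mul) := by
  by_cases hc : acc.contains x = true
  · obtain ⟨v, hv⟩ : ∃ v, acc.get? x = some v := by
      rw [PySem.Dict.contains_eq_isSome_get?] at hc
      exact Option.isSome_iff_exists.mp hc
    have hmem : (x, v) ∈ acc.items := PySem.Dict.mem_items_of_get?_eq_some acc hv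
    have hgd : acc.getD x 0 = v := PySem.Dict.getD_of_mem_items acc hmem hnd 0
    rw [PySem.Dict.items_insert_of_contains _ _ hc, hgd]
    exact merge_subst t acc.items mul x v (by simpa only [PySem.Dict.keys] using hnd) hmem
  · have hc' : acc.contains x = false := by simpa using hc
    rw [PySem.Dict.items_insert_of_not_contains _ _ hc',
        PySem.Dict.getD_of_not_contains _ _ hc']
    simp only [pvMerge, List.foldl_append, List.foldl_cons, List.foldl_nil]
    norm_num

-- countdict-then-merge = A's direct pass
theorem merge_count_gen (mul : Int) (xs : List String) :
    ∀ (acc : PySem.Dict String Int) (t : PySem.Dict String Int), acc.keys.Nodup →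
    pvMerge t ((xs.foldl (fun c v => c.insert v (c.getD v 0 + 1)) acc).items) mul
      = pvApply (pvMerge t acc.items mul) xs mul := by
  induction xs with
  | nil => intro acc t _; rfl
  | cons v xs ih =>
    intro acc t hnd
    simp only [List.foldl_cons]
    rw [ih (acc.insert v (acc.getD v 0 + 1)) t (PySem.Dict.nodup_keys_insert _ _ _ hnd),
        merge_bump t acc mul v hnd]
    rfl

theorem merge_count_eq_apply (xs : List String) (t : PySem.Dict String Int) (mul : Int) :
    pvMerge t (pvCount xs).items mul = pvApply t xs mul := by
  have h := merge_count_gen mul xs PySem.Dict.empty t PySem.Dict.nodup_keys_empty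
  simpa only [pvCount, pvMerge, PySem.Dict.items, List.foldl_nil] using h

-- A's triple loop splits into three independent passes
theorem loop_split (mul : Int) (its : List (PySem.Dict String String))
    (col fab form : PySem.Dict String Int) :
    its.foldl (fun (s : PySem.Dict String Int × PySem.Dict String Int × PySem.Dict String Int) it =>
      let c := safeLower (it.get? "color")
      let f := safeLower (it.get? "fabric")
      let fm := safeLower (it.get? "formality")
      let col := if c ≠ "" then s.1.insert c (s.1.getD c 0 + mul) else s.1
      let fab := if f ≠ "" then s.2.1.insert f (s.2.1.getD f 0 + mul) else s.2.1
      let form := if fm ≠ "" then s.2.2.insert fm (s.2.2.getD fm 0 + mul) else s.2.2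
      (col, fab, form)) (col, fab, form)
    = (pvApply col (pvFieldVals its "color") mul,
       pvApply fab (pvFieldVals its "fabric") mul,
       pvApply form (pvFieldVals its "formality") mul) := by
  induction its generalizing col fab form with
  | nil => rfl
  | cons it its ih =>
    simp only [List.foldl_cons]
    rw [ih]
    simp only [pvFieldVals, List.map_cons, List.filter_cons]
    by_cases hc : safeLower (it.get? "color") ≠ "" <;>
    by_cases hf : safeLower (it.get? "fabric") ≠ "" <;>
    by_cases hfm : safeLower (it.get? "formality") ≠ "" <;>
      simp [hc, hf, hfm, pvApply]

-- setdefault at k commutes with an insert at another, already-present key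
theorem setdefault_insert_comm (d : PySem.Dict String (PySem.Dict String Int))
    (k k' : String) (w : PySem.Dict String Int) (hne : k ≠ k') (hk' : d.contains k' = true) :
    (d.insert k' w).setdefault k PySem.Dict.empty
      = (d.setdefault k PySem.Dict.empty).insert k' w := by
  have hck : (d.insert k' w).contains k = d.contains k := by
    rw [PySem.Dict.contains_insert]; simp [hne]
  by_cases hk : d.contains k = true
  · rw [PySem.Dict.setdefault_of_contains _ _ (hck.trans hk),
        PySem.Dict.setdefault_of_contains _ _ hk]
  · have hkf : d.contains k = false := by simpa using hk
    rw [PySem.Dict.setdefault_of_not_contains _ _ (hck.trans hkf),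
        PySem.Dict.setdefault_of_not_contains _ _ hkf,
        insert_insert_of_contains d k' k w PySem.Dict.empty hk' hne]

theorem main_eq (up : List (String × List (String × Int))) (items : List (List (String × String))) (label : String) :
    update_profile_counts up items label = update_profile_counts_alt up items label := by
  unfold update_profile_counts update_profile_counts_alt
  simp only [List.foldl_cons, List.foldl_nil]
  rw [loop_split, merge_count_eq_apply, merge_count_eq_apply, merge_count_eq_apply]
  dsimp only
  apply congrArg pvOut
  have hne1 : "preferred_fabrics" ≠ "preferred_colors" := by decide
  have hne2 : "preferred_formality" ≠ "preferred_colors" := by decide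
  have hne3 : "preferred_formality" ≠ "preferred_fabrics" := by decide
  set d0 := pvOuter up with hd0
  set d1 := d0.setdefault "preferred_colors" PySem.Dict.empty with hd1
  have hc1 : d1.contains "preferred_colors" = true := by
    rw [hd1, PySem.Dict.contains_setdefault]; simp
  rw [PySem.Dict.getD_insert_of_ne _ _ _ hne1]
  rw [setdefault_insert_comm d1 "preferred_fabrics" "preferred_colors" _ hne1 hc1]
  set d2 := d1.setdefault "preferred_fabrics" PySem.Dict.empty with hd2
  have hc2 : d2.contains "preferred_colors" = true := by
    rw [hd2, PySem.Dict.contains_setdefault]; simp [hc1]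
  have hcf : d2.contains "preferred_fabrics" = true := by
    rw [hd2, PySem.Dict.contains_setdefault]; simp
  rw [PySem.Dict.getD_insert_of_ne _ _ _ hne3, PySem.Dict.getD_insert_of_ne _ _ _ hne2]
  have hcf' : (PySem.Dict.insert d2 "preferred_colors" (pvApply (d0.getD "preferred_colors" PySem.Dict.empty) (pvFieldVals (pvItems items) "color") (if (label == "like") = true then 1 else -1))).contains "preferred_fabrics" = true := by
    rw [PySem.Dict.contains_insert]; simp [hcf]
  rw [setdefault_insert_comm _ "preferred_formality" "preferred_fabrics" _ hne3 hcf']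
  rw [setdefault_insert_comm d2 "preferred_formality" "preferred_colors" _ hne2 hc2]

-- ===== VERDICT (by name: the statement is the Claim_ definition above) =====
theorem update_profile_counts_spec : Claim_equal_update_profile_counts := by
  intro up items label _
  unfold Spec_update_profile_counts
  exact main_eq up items label
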